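-- pv_equiv track=rewrite | github.com/chojuninengu/amega-ai | backend/pr_reviewer.py | _parse_review_response
-- ===== SOURCE A (Python) =====
-- from typing import List, Dict, Optional
--
-- def _parse_review_response(response: str) -> Dict:
--     """
--     Parses the LLM's review response into categorized lists of feedback.
--
--     The response is split into sections labeled ISSUES, STYLE, PERFORMANCE, SECURITY, and SUGGESTIONS, with each section containing a list of bullet-pointed items.
--
--     Args:
--         response: The multiline string response from the LLM.
--
--     Returns:
--         A dictionary mapping each feedback category to a list of extracted suggestions or issues.
--     """
--     sections = {
--         'ISSUES': [],
--         'STYLE': [],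
--         'PERFORMANCE': [],
--         'SECURITY': [],
--         'SUGGESTIONS': []
--     }
--
--     current_section = None
--     for line in response.split('\n'):
--         line = line.strip()
--         if not line:
--             continue
--
--         if line.endswith(':') and line.rstrip(':').upper() in sections:
--             current_section = line.rstrip(':').upper()
--         elif current_section and line.startswith('-'):
--             sections[current_section].append(line[1:].strip())
--
--     return sections
-- ===== SOURCE B (Python) =====
-- def _parse_review_response(response: str) -> dict:
--     # Two-phase parse: locate recognized section headers first, then slice out
--     # each header's block of lines and collect its bullet items.
--     sections = {'ISSUES': [], 'STYLE': [], 'PERFORMANCE': [], 'SECURITY': [], 'SUGGESTIONS': []}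
--     lines = [ln.strip() for ln in response.split('\n')]
--     headers = []
--     for i, ln in enumerate(lines):
--         if ln.endswith(':'):
--             label = ln.rstrip(':').upper()
--             if label in sections:
--                 headers.append((i, label))
--     for j, (i, label) in enumerate(headers):
--         end = headers[j + 1][0] if j + 1 < len(headers) else len(lines)
--         block = lines[i + 1:end]
--         sections[label].extend(ln[1:].strip() for ln in block if ln.startswith('-'))
--     return sections
-- ===== Notes on version B (the rewrite author's own statement) =====
-- stated objective: alternative
-- what changed: A's single-pass state machine (tracking the current section while scanning lines) is replaced by a two-phase parse: one pass records the positions and labels of all recognized headers, then each header's block is sliced out and its bullet lines extracted into the pre-initialized section lists.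
import Mathlib
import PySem

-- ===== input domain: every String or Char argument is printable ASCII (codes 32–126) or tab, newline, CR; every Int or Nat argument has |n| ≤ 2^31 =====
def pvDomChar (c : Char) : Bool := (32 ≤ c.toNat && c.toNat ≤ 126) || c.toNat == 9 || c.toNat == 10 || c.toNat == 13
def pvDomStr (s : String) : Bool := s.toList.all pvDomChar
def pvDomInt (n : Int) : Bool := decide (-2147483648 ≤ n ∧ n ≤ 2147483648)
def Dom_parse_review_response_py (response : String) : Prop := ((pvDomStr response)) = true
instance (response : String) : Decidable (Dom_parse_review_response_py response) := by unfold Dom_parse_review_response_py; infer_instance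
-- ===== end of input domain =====

-- B is an alternative two-phase decomposition (find header positions, then slice out each block);
-- A is a single-pass state machine.  Same cost; equivalence proved on all inputs.

-- ===== PORT A =====
-- hand port of s.rstrip(':') (PySem has no rstrip-with-chars): drop trailing ':' characters; exact
def rstripColon (s : String) : String :=
  String.mk ((s.toList.reverse.dropWhile (fun c => c == ':')).reverse)

def initSections : PySem.Dict String (List String) :=
  PySem.Dict.mk [("ISSUES", []), ("STYLE", []), ("PERFORMANCE", []), ("SECURITY", []), ("SUGGESTIONS", [])]

-- loop body of A: line = raw.strip(); blank lines skipped; header test; bullet under current section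
def stepA (st : Option String × PySem.Dict String (List String)) (raw : String) :
    Option String × PySem.Dict String (List String) :=
  if PySem.Str.strip raw = "" then st
  else if PySem.Str.endswith (PySem.Str.strip raw) ":" &&
      st.2.contains (PySem.Str.upper (rstripColon (PySem.Str.strip raw))) then
    (some (PySem.Str.upper (rstripColon (PySem.Str.strip raw))), st.2)
  else
    match st.1 with
    | some cur =>
        if PySem.Str.startswith (PySem.Str.strip raw) "-" then
          (some cur, st.2.modify cur []
            (fun v => v ++ [PySem.Str.strip (PySem.Str.slice (PySem.Str.strip raw) (some 1) none)]))
        else st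
    | none => st

def parse_review_response_py (response : String) : List (String × List String) :=
  ((((PySem.Str.split? response "\n").getD []).foldl stepA (none, initSections)).2).items

-- ===== PORT B =====
def hdrOf (line : String) : Option String :=
  if PySem.Str.endswith line ":" then
    let label := PySem.Str.upper (rstripColon line)
    if initSections.contains label then some label else none
  else none

def bulletOf (line : String) : Option String :=
  if PySem.Str.startswith line "-" then
    some (PySem.Str.strip (PySem.Str.slice line (some 1) none))
  else none

def headersOf (lines : List String) : List (Int × String) :=
  (PySem.List.enumerate lines).filterMap (fun p => (hdrOf p.2).map (fun lab => (p.1, lab)))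

def procBlocks (lines : List String) :
    List (Int × String) → PySem.Dict String (List String) → PySem.Dict String (List String)
  | [], d => d
  | (i, lab) :: rest, d =>
      let stop : Int := match rest with | [] => (lines.length : Int) | (j, _) :: _ => j
      let block := PySem.List.slice lines (some (i + 1)) (some stop)
      procBlocks lines rest (d.modify lab [] (fun v => v ++ block.filterMap bulletOf))

def parse_review_response_py_alt (response : String) : List (String × List String) :=
  (procBlocks (((PySem.Str.split? response "\n").getD []).map PySem.Str.strip)
    (headersOf (((PySem.Str.split? response "\n").getD []).map PySem.Str.strip))
    initSections).items

-- ===== PRECONDITION & SPEC =====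
def Spec_parse_review_response_py (response : String) (out : List (String × List String)) : Prop := out = parse_review_response_py_alt response
instance (response : String) (out : List (String × List String)) : Decidable (Spec_parse_review_response_py response out) := by unfold Spec_parse_review_response_py; infer_instance

-- ===== CLAIM (what is proved, stated in full; the proofs are below) =====
def Claim_equal_parse_review_response_py : Prop := ∀ (response : String), Dom_parse_review_response_py response → Spec_parse_review_response_py response (parse_review_response_py response)

-- ===== LEMMAS AND PROOFS =====

def noHdr (l : String) : Bool := (hdrOf l).isNone

def bulletsPre (ls : List String) : List String := (ls.takeWhile noHdr).filterMap bulletOf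

-- common intermediate: the (label, bullets-of-its-block) pairs, one per header occurrence in order
def chunks : List String → List (String × List String)
  | [] => []
  | l :: ls =>
      match hdrOf l with
      | some lab => (lab, bulletsPre ls) :: chunks ls
      | none => chunks ls

def stepD (d : PySem.Dict String (List String)) (p : String × List String) :
    PySem.Dict String (List String) := d.modify p.1 [] (fun v => v ++ p.2)

-- header positions with Nat indices (proof-side mirror of headersOf)
def hIdx : List String → Nat → List (Nat × String)
  | [], _ => []
  | l :: ls, k =>
      match hdrOf l with
      | some lab => (k, lab) :: hIdx ls (k + 1)
      | none => hIdx ls (k + 1)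

lemma contains_of_keys_eq {ν : Type} (d e : PySem.Dict String ν) (h : d.keys = e.keys) (x : String) :
    d.contains x = e.contains x := by
  rw [PySem.Dict.contains_eq_decide_mem_keys, PySem.Dict.contains_eq_decide_mem_keys, h]

lemma initSections_nodup : initSections.keys.Nodup := by decide

lemma dict_insert_getD_self {κ ν : Type} [BEq κ] [LawfulBEq κ] (d : PySem.Dict κ ν) (k : κ) (d0 : ν)
    (hc : d.contains k = true) (hnd : d.keys.Nodup) : d.insert k (d.getD k d0) = d := by
  apply PySem.Dict.ext
  rw [PySem.Dict.items_insert_of_contains d _ hc]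
  have hid : ∀ p ∈ d.items, (fun p => if (p.1 == k) = true then (k, d.getD k d0) else p) p = id p := by
    intro p hp
    obtain ⟨a, b⟩ := p
    by_cases hk : a = k
    · subst hk
      have := PySem.Dict.getD_of_mem_items d hp hnd (d0 := d0)
      simp [this]
    · simp [hk]
  rw [List.map_congr_left hid, List.map_id]

lemma modify_append_nil {κ : Type} [BEq κ] [LawfulBEq κ] (d : PySem.Dict κ (List String)) (c : κ)
    (hc : d.contains c = true) (hnd : d.keys.Nodup) :
    d.modify c [] (fun v => v ++ ([] : List String)) = d := by
  unfold PySem.Dict.modify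
  simpa using dict_insert_getD_self d c [] hc hnd

lemma modify_modify_append {κ : Type} [BEq κ] [LawfulBEq κ] (d : PySem.Dict κ (List String)) (c : κ)
    (xs ys : List String) :
    (d.modify c [] (fun v => v ++ xs)).modify c [] (fun v => v ++ ys)
      = d.modify c [] (fun v => v ++ (xs ++ ys)) := by
  unfold PySem.Dict.modify
  rw [PySem.Dict.getD_insert_self, PySem.Dict.insert_insert_self]
  simp [List.append_assoc]

lemma keys_modify_of_contains {κ ν : Type} [BEq κ] [LawfulBEq κ] (d : PySem.Dict κ ν) (c : κ) (d0 : ν)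
    (f : ν → ν) (hc : d.contains c = true) : (d.modify c d0 f).keys = d.keys := by
  rw [PySem.Dict.keys_modify]
  exact PySem.Dict.keys_insert_of_contains d _ hc

lemma hdrOf_blank : hdrOf "" = none := by decide

lemma bulletOf_blank : bulletOf "" = none := by decide

-- A's fold equals the chunk fold
lemma foldA_chunks (L : List String) :
    ∀ (cur : Option String) (d : PySem.Dict String (List String))
      (hk : d.keys = initSections.keys)
      (hc : ∀ c, cur = some c → initSections.contains c = true),
    (L.foldl stepA (cur, d)).2 =
      (chunks (L.map PySem.Str.strip)).foldl stepD
        (cur.elim d (fun c => d.modify c [] (fun v => v ++ bulletsPre (L.map PySem.Str.strip)))) := by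
  induction L with
  | nil =>
      intro cur d hk hc
      cases cur with
      | none => simp [chunks]
      | some c =>
          have hcc : d.contains c = true := by
            rw [contains_of_keys_eq d initSections hk]; exact hc c rfl
          have hnd : d.keys.Nodup := by rw [hk]; exact initSections_nodup
          simp only [List.foldl_nil, List.map_nil, Option.elim, chunks, bulletsPre,
            List.takeWhile_nil, List.filterMap_nil]
          exact (modify_append_nil d c hcc hnd).symm
  | cons l ls ih =>
      intro cur d hk hc
      have hnd : d.keys.Nodup := by rw [hk]; exact initSections_nodup
      have hcont : ∀ x, d.contains x = initSections.contains x :=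
        contains_of_keys_eq d initSections hk
      rw [List.foldl_cons]
      simp only [List.map_cons]
      have hstepA : ∀ st : Option String × PySem.Dict String (List String), stepA st l =
          (if PySem.Str.strip l = "" then st
           else if PySem.Str.endswith (PySem.Str.strip l) ":" &&
               st.2.contains (PySem.Str.upper (rstripColon (PySem.Str.strip l))) then
             (some (PySem.Str.upper (rstripColon (PySem.Str.strip l))), st.2)
           else
             match st.1 with
             | some cur =>
                 if PySem.Str.startswith (PySem.Str.strip l) "-" then
                   (some cur, st.2.modify cur []
                     (fun v => v ++ [PySem.Str.strip (PySem.Str.slice (PySem.Str.strip l) (some 1) none)]))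
                 else st
             | none => st) := fun _ => rfl
      rw [show List.foldl stepA (stepA (cur, d) l) ls = List.foldl stepA (stepA (cur, d) l) ls from rfl]
      generalize hm : PySem.Str.strip l = m at hstepA ⊢
      generalize hM : List.map PySem.Str.strip ls = M at ih ⊢
      by_cases hb : m = ""
      · -- blank line: state unchanged, chunk structure unchanged
        have hstep : stepA (cur, d) l = (cur, d) := by
          rw [hstepA, if_pos hb]
        have e1 : chunks (m :: M) = chunks M := by
          rw [hb]; simp only [chunks, hdrOf_blank]
        have e2 : bulletsPre (m :: M) = bulletsPre M := by
          rw [hb]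
          simp only [bulletsPre, List.takeWhile_cons, show noHdr "" = true by decide, if_true,
            List.filterMap_cons, bulletOf_blank]
        rw [hstep, ih cur d hk hc]
        simp only [e1, e2]
      · by_cases hh : (PySem.Str.endswith m ":" &&
            initSections.contains (PySem.Str.upper (rstripColon m))) = true
        · -- header line: section pointer moves, dict untouched
          obtain ⟨h1, h2⟩ := Bool.and_eq_true_iff.mp hh
          have hcond : (PySem.Str.endswith m ":" &&
              d.contains (PySem.Str.upper (rstripColon m))) = true := by
            rw [hcont]; exact hh
          have hstep : stepA (cur, d) l = (some (PySem.Str.upper (rstripColon m)), d) := by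
            rw [hstepA, if_neg hb, if_pos hcond]
          have hhdr : hdrOf m = some (PySem.Str.upper (rstripColon m)) := by
            simp only [hdrOf]; rw [if_pos h1, if_pos h2]
          have hch : chunks (m :: M) =
              (PySem.Str.upper (rstripColon m), bulletsPre M) :: chunks M := by
            simp only [chunks, hhdr]
          have hc' : ∀ c, (some (PySem.Str.upper (rstripColon m)) : Option String) = some c →
              initSections.contains c = true := fun c hcx => by
            rw [← Option.some.inj hcx]; exact h2
          rw [hstep, ih (some (PySem.Str.upper (rstripColon m))) d hk hc', hch, List.foldl_cons]
          cases cur with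
          | none => simp only [Option.elim, stepD]
          | some c =>
              have hcc : d.contains c = true := by rw [hcont]; exact hc c rfl
              have hbp : bulletsPre (m :: M) = [] := by
                have hno : noHdr m = false := by simp [noHdr, hhdr]
                simp [bulletsPre, List.takeWhile_cons, hno]
              simp only [Option.elim, hbp]
              rw [modify_append_nil d c hcc hnd]
              simp only [stepD]
        · -- not a header line
          have hcond : ¬ (PySem.Str.endswith m ":" &&
              d.contains (PySem.Str.upper (rstripColon m))) = true := by
            rw [hcont]; exact hh
          have hhdr : hdrOf m = none := by
            simp only [hdrOf]
            by_cases he : PySem.Str.endswith m ":" = true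
            · have hc2 : ¬ initSections.contains (PySem.Str.upper (rstripColon m)) = true := by
                intro hx; exact hh (by rw [he, hx]; rfl)
              rw [if_pos he, if_neg hc2]
            · rw [if_neg he]
          have hch : chunks (m :: M) = chunks M := by simp only [chunks, hhdr]
          have hno : noHdr m = true := by simp [noHdr, hhdr]
          cases cur with
          | none =>
              have hstep : stepA (none, d) l = (none, d) := by
                rw [hstepA, if_neg hb, if_neg hcond]
              rw [hstep, ih none d hk hc, hch]
              rfl
          | some c =>
              have hcc : d.contains c = true := by rw [hcont]; exact hc c rfl
              by_cases hbu : PySem.Str.startswith m "-" = true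
              · have hstep : stepA (some c, d) l = (some c, d.modify c []
                    (fun v => v ++ [PySem.Str.strip (PySem.Str.slice m (some 1) none)])) := by
                  rw [hstepA, if_neg hb, if_neg hcond]
                  show (if PySem.Str.startswith m "-" = true then
                      ((some c : Option String), d.modify c []
                        (fun v => v ++ [PySem.Str.strip (PySem.Str.slice m (some 1) none)]))
                    else (some c, d)) = _
                  rw [if_pos hbu]
                have hk' : (d.modify c []
                    (fun v => v ++ [PySem.Str.strip (PySem.Str.slice m (some 1) none)])).keys
                      = initSections.keys := by
                  rw [keys_modify_of_contains d c _ _ hcc]; exact hk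
                have hbul : bulletOf m = some (PySem.Str.strip (PySem.Str.slice m (some 1) none)) := by
                  simp only [bulletOf]; rw [if_pos hbu]
                have hbp : bulletsPre (m :: M) =
                    PySem.Str.strip (PySem.Str.slice m (some 1) none) :: bulletsPre M := by
                  simp [bulletsPre, List.takeWhile_cons, hno, List.filterMap_cons, hbul]
                rw [hstep, ih (some c) _ hk' hc, hch]
                simp only [Option.elim, hbp]
                rw [modify_modify_append, List.singleton_append]
              · have hstep : stepA (some c, d) l = (some c, d) := by
                  rw [hstepA, if_neg hb, if_neg hcond]
                  show (if PySem.Str.startswith m "-" = true then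
                      ((some c : Option String), d.modify c []
                        (fun v => v ++ [PySem.Str.strip (PySem.Str.slice m (some 1) none)]))
                    else (some c, d)) = _
                  rw [if_neg hbu]
                have hbul : bulletOf m = none := by
                  simp only [bulletOf]; rw [if_neg hbu]
                have hbp : bulletsPre (m :: M) = bulletsPre M := by
                  simp [bulletsPre, List.takeWhile_cons, hno, List.filterMap_cons, hbul]
                rw [hstep, ih (some c) d hk hc, hch]
                simp only [Option.elim, hbp]

lemma takeWhile_as_take {α : Type} (p : α → Bool) (M : List α) :
    M.takeWhile p = M.take (M.takeWhile p).length := by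
  induction M with
  | nil => simp
  | cons x xs ih =>
      by_cases h : p x
      · simp only [List.takeWhile_cons_of_pos h, List.length_cons, List.take_succ_cons]
        exact congrArg _ ih
      · simp [List.takeWhile_cons_of_neg h]

lemma hIdx_nil (M : List String) (k : Nat) (h : hIdx M k = []) : M.takeWhile noHdr = M := by
  induction M generalizing k with
  | nil => simp
  | cons l ls ih =>
      simp only [hIdx] at h
      cases hh : hdrOf l with
      | some lab => rw [hh] at h; exact absurd h (by simp)
      | none =>
          rw [hh] at h
          simp [List.takeWhile_cons, noHdr, hh, ih (k + 1) h]

lemma hIdx_head (M : List String) (k j : Nat) (lab : String) (t : List (Nat × String))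
    (h : hIdx M k = (j, lab) :: t) : j = k + (M.takeWhile noHdr).length := by
  induction M generalizing k with
  | nil => simp [hIdx] at h
  | cons l ls ih =>
      simp only [hIdx] at h
      cases hh : hdrOf l with
      | some lab' =>
          rw [hh] at h
          have : k = j := by simpa using congrArg (fun x => (x.headD (0, "")).1) h
          simp [List.takeWhile_cons, noHdr, hh, ← this]
      | none =>
          rw [hh] at h
          have := ih (k + 1) h
          simp [List.takeWhile_cons, noHdr, hh]
          omega

lemma length_drop_cons {α : Type} (L M : List α) (x : α) (i : Nat) (h : L.drop i = x :: M) :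
    M.length = L.length - (i + 1) := by
  have := congrArg List.length h
  simp [List.length_drop] at this
  omega

lemma procBlocks_chunks (L : List String) :
    ∀ (M : List String) (i : Nat) (d : PySem.Dict String (List String)), L.drop i = M →
    procBlocks L ((hIdx M i).map (fun q => ((q.1 : Int), q.2))) d = (chunks M).foldl stepD d := by
  intro M
  induction M with
  | nil => intro i d _; simp [hIdx, procBlocks, chunks]
  | cons l ls ih =>
      intro i d hdrop
      have hdrop' : L.drop (i + 1) = ls := by
        rw [← List.tail_drop, hdrop]; rfl
      have hlen : ls.length = L.length - (i + 1) := length_drop_cons L ls l i hdrop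
      cases hh : hdrOf l with
      | none =>
          have h1 : hIdx (l :: ls) i = hIdx ls (i + 1) := by simp [hIdx, hh]
          have h2 : chunks (l :: ls) = chunks ls := by simp [chunks, hh]
          rw [h1, h2, ih (i + 1) d hdrop']
      | some lab =>
          have h1 : hIdx (l :: ls) i = (i, lab) :: hIdx ls (i + 1) := by simp [hIdx, hh]
          have h2 : chunks (l :: ls) = (lab, bulletsPre ls) :: chunks ls := by simp [chunks, hh]
          rw [h1, h2]
          simp only [List.map_cons, procBlocks, List.foldl_cons]
          have hblock : PySem.List.slice L (some ((i : Int) + 1))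
              (some (match (hIdx ls (i + 1)).map (fun q => ((q.1 : Int), q.2)) with
                     | [] => (L.length : Int) | (j, _) :: _ => j)) = ls.takeWhile noHdr := by
            cases hrest : hIdx ls (i + 1) with
            | nil =>
                have := hIdx_nil ls (i + 1) hrest
                have hcast : (i : Int) + 1 = ((i + 1 : Nat) : Int) := by push_cast; ring
                simp only [List.map_nil, hcast, PySem.List.slice_natCast]
                rw [hdrop', this, ← hlen]
                simp
            | cons q t =>
                obtain ⟨j, lab'⟩ := q
                have hj := hIdx_head ls (i + 1) j lab' t hrest
                have hcast : (i : Int) + 1 = ((i + 1 : Nat) : Int) := by push_cast; ring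
                simp only [List.map_cons, hcast, PySem.List.slice_natCast]
                rw [hdrop', hj]
                have : i + 1 + (ls.takeWhile noHdr).length - (i + 1) = (ls.takeWhile noHdr).length := by omega
                rw [this, ← takeWhile_as_take]
          rw [hblock, ih (i + 1) _ hdrop']
          rfl

lemma headersOf_eq_hIdx (L : List String) :
    ∀ (k : Nat), (PySem.List.enumerate L (k : Int)).filterMap
        (fun p => (hdrOf p.2).map (fun lab => (p.1, lab)))
      = (hIdx L k).map (fun q => ((q.1 : Int), q.2)) := by
  induction L with
  | nil => intro k; simp [PySem.List.enumerate, hIdx]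
  | cons l ls ih =>
      intro k
      rw [PySem.List.enumerate_cons]
      have hcast : (k : Int) + 1 = ((k + 1 : Nat) : Int) := by push_cast; ring
      rw [hcast]
      cases hh : hdrOf l with
      | none =>
          have h1 : hIdx (l :: ls) k = hIdx ls (k + 1) := by simp [hIdx, hh]
          simp only [List.filterMap_cons, hh, Option.map_none, h1]
          exact ih (k + 1)
      | some lab =>
          have h1 : hIdx (l :: ls) k = (k, lab) :: hIdx ls (k + 1) := by simp [hIdx, hh]
          simp only [List.filterMap_cons, hh, Option.map_some, h1, List.map_cons]
          rw [ih (k + 1)]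

-- ===== VERDICT (by name: the statement is the Claim_ definition above) =====
theorem parse_review_response_py_spec : Claim_equal_parse_review_response_py := by
  intro response _
  unfold Spec_parse_review_response_py parse_review_response_py parse_review_response_py_alt
  set raws := (PySem.Str.split? response "\n").getD [] with hraws
  have hA := foldA_chunks raws none initSections rfl (by intro c h; cases h)
  simp only [Option.elim] at hA
  rw [hA]
  have hH : headersOf (raws.map PySem.Str.strip) =
      (hIdx (raws.map PySem.Str.strip) 0).map (fun q => ((q.1 : Int), q.2)) := by
    have := headersOf_eq_hIdx (raws.map PySem.Str.strip) 0
    simpa [headersOf] using this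
  rw [hH, procBlocks_chunks (raws.map PySem.Str.strip) (raws.map PySem.Str.strip) 0 initSections (by simp)]
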